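-- pv_equiv track=rewrite | github.com/gwsoft/py.check.io | Home/Home.py | three_words
-- ===== SOURCE A (Python) =====
-- def three_words(words: str) -> bool:
-- 	wordlist = words.split(' ')							# convert the input string to an array
-- 	l_sum = 0											# counts consecutive occurences of words
-- 	res = False											# return variable
-- 	for x in wordlist:									# iterate the array
-- 		l_weight = 0 if x.isnumeric() else 1			# check if the element is a word
-- 		l_sum = l_sum + 1 if l_weight == 1 else 0		# .. if it is, then increase word occurences
-- 		if l_sum == 3:									# .. break the loop if this is 3rd word in a row
-- 			res = True
-- 			break
-- 	return res
-- ===== SOURCE B (Python) =====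
-- def three_words(words: str) -> bool:
--     flags = ''.join('0' if x.isnumeric() else '1' for x in words.split(' '))
--     return '111' in flags
-- ===== Notes on version B (the rewrite author's own statement) =====
-- stated objective: idiomatic
-- what changed: Replaces the stateful running-count loop with an early break by mapping each token to a one-character numeric/word flag, joining the flags into a string and testing whether a run of three word flags occurs as a substring.
import Mathlib
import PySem

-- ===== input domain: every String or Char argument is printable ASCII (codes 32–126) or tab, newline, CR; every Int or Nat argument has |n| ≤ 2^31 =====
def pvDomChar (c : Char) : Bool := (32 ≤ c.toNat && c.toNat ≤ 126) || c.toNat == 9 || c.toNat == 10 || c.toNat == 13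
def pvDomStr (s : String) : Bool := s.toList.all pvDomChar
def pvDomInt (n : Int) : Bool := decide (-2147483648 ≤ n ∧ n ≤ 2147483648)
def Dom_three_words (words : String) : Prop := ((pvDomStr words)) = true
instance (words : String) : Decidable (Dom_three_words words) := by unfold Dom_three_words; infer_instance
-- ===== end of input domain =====

-- B replaces A's running-count loop with an early break by a flag string plus a '111' substring test (idiomatic; same cost).
-- x.isnumeric() is ported as PySem.Chars.strIsdigit — exact on the ASCII domain, where isnumeric and isdigit coincide.

-- ===== PORT A =====
-- the for-loop with its accumulator l_sum and the 'break' on l_sum == 3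
def three_words_go : List (List Char) → Int → Bool
  | [], _ => false
  | x :: xs, l_sum =>
      let l_weight : Int := if PySem.Chars.strIsdigit x then 0 else 1
      let l_sum' : Int := if l_weight == 1 then l_sum + 1 else 0
      if l_sum' == 3 then true else three_words_go xs l_sum'

def three_words (words : String) : Bool :=
  three_words_go (PySem.Chars.splitOn words.toList [' ']) 0

-- ===== PORT B =====
def three_words_alt (words : String) : Bool :=
  let flags := PySem.Chars.join []
    ((PySem.Chars.splitOn words.toList [' ']).map
      (fun x => if PySem.Chars.strIsdigit x then ['0'] else ['1']))
  PySem.Chars.isIn ['1', '1', '1'] flags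

-- ===== PRECONDITION & SPEC =====
def Spec_three_words (words : String) (out : Bool) : Prop := out = three_words_alt words
instance (words : String) (out : Bool) : Decidable (Spec_three_words words out) := by unfold Spec_three_words; infer_instance

-- ===== CLAIM (what is proved, stated in full; the proofs are below) =====
def Claim_equal_three_words : Prop := ∀ (words : String), Dom_three_words words → Spec_three_words words (three_words words)

-- ===== LEMMAS AND PROOFS =====

-- the flag character of one token
def pvFlag (x : List Char) : Char := if PySem.Chars.strIsdigit x then '0' else '1'

-- '111' cannot sit inside a list of at most two characters
theorem pv_not_infix_short {u : List Char} (hu : u.length ≤ 2) :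
    ¬ (['1', '1', '1'] <:+: u) := by
  intro h
  have := h.length_le
  simp at this
  omega

-- peeling a non-'1' head block: an occurrence of '111' cannot cross a '0'
theorem pv_infix_zero_cons (t : List Char) :
    (['1', '1', '1'] <:+: ('0' :: t)) ↔ (['1', '1', '1'] <:+: t) := by
  rw [List.infix_cons_iff]
  constructor
  · rintro (h | h)
    · rcases h with ⟨r, hr⟩
      simp at hr
    · exact h
  · exact Or.inr

theorem pv_infix_one_cons (t : List Char) :
    (['1', '1', '1'] <:+: ('1' :: t)) ↔ (['1', '1'] <+: t ∨ ['1', '1', '1'] <:+: t) := by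
  rw [List.infix_cons_iff]
  constructor
  · rintro (h | h)
    · rcases h with ⟨r, hr⟩
      refine Or.inl ⟨r, ?_⟩
      simpa using hr
    · exact Or.inr h
  · rintro (h | h)
    · rcases h with ⟨r, hr⟩
      exact Or.inl ⟨r, by simp [hr]⟩
    · exact Or.inr h

-- main invariant: the loop with counter k (k ≤ 2) answers the substring question
-- on k leading '1's followed by the flags of the remaining tokens
theorem pv_go_eq (l : List (List Char)) :
    ∀ k : Nat, k ≤ 2 →
      (three_words_go l (k : Int) = true ↔
        (['1', '1', '1'] <:+: (List.replicate k '1' ++ l.map pvFlag))) := by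
  induction l with
  | nil =>
      intro k hk
      simp only [three_words_go, List.map_nil, List.append_nil]
      constructor
      · intro h; cases h
      · intro h
        exact absurd h (pv_not_infix_short (by simp [List.length_replicate]; omega))
  | cons x xs ih =>
      intro k hk
      by_cases hd : PySem.Chars.strIsdigit x
      · -- numeric token: counter resets to 0, flag is '0'
        have hgo : three_words_go (x :: xs) (k : Int) = three_words_go xs 0 := by
          simp [three_words_go, hd]
        rw [hgo]
        have h0 := ih 0 (by omega)
        simp only [List.replicate, List.nil_append, Nat.cast_zero] at h0
        rw [h0]
        -- peel the k ones and the '0'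
        have hflag : pvFlag x = '0' := by simp [pvFlag, hd]
        simp only [List.map_cons, hflag]
        interval_cases k <;>
          simp [pv_infix_zero_cons, pv_infix_one_cons, List.replicate]
      · -- word token: counter becomes k+1, flag is '1'
        have hflag : pvFlag x = '1' := by simp [pvFlag, hd]
        have hrep : List.replicate k '1' ++ (x :: xs).map pvFlag
            = List.replicate (k + 1) '1' ++ xs.map pvFlag := by
          simp [List.map_cons, hflag, List.replicate_succ']
        rw [hrep]
        by_cases hk2 : k = 2
        · subst hk2
          have hgo : three_words_go (x :: xs) ((2 : Nat) : Int) = true := by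
            simp [three_words_go, hd]
          rw [hgo]
          simp only [true_iff]
          exact ⟨[], xs.map pvFlag, by simp [List.replicate]⟩
        · have hgo : three_words_go (x :: xs) ((k : Nat) : Int)
              = three_words_go xs ((k + 1 : Nat) : Int) := by
            simp only [three_words_go, hd]
            norm_num
            omega
          rw [hgo]
          exact ih (k + 1) (by omega)

-- the joined flag string is just the list of flag characters
theorem pv_flags_eq (ws : List (List Char)) :
    PySem.Chars.join [] (ws.map (fun x => if PySem.Chars.strIsdigit x then ['0'] else ['1']))
      = ws.map pvFlag := by
  have : (fun x => if PySem.Chars.strIsdigit x then ['0'] else ['1'])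
      = (fun c => [c]) ∘ pvFlag := by
    funext x
    simp [pvFlag, apply_ite (fun c => [c])]
  rw [this, ← List.map_map]
  exact PySem.Chars.join_nil_singletons _

-- ===== VERDICT (by name: the statement is the Claim_ definition above) =====
theorem three_words_spec : Claim_equal_three_words := by
  intro words _
  unfold Spec_three_words three_words three_words_alt
  rw [pv_flags_eq]
  have h := pv_go_eq (PySem.Chars.splitOn words.toList [' ']) 0 (by omega)
  simp only [List.replicate, List.nil_append, Nat.cast_zero] at h
  rw [Bool.eq_iff_iff, h, PySem.Chars.isIn_iff_infix]
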